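-- pv_equiv track=rewrite | github.com/revuel/PatternOmatic | PatternOmatic/nlp/bnf.py | _all_feature_terminal_list
-- ===== SOURCE A (Python) =====
-- def _all_feature_terminal_list(features_dict: dict) -> list:
--     """
--     Stacks all feature terminal options in a list of lists to be used for the extended pattern syntax set operators
--     Args:
--         features_dict: dictionary of feature keys with all possible feature value options
--
--     Returns:
--
--     """
--     all_terminal_list = list()
--
--     for item in list(features_dict.items()):
--         current_terminal_holder = list()
--
--         for terminal_list_item in item[1]:
--             if len(current_terminal_holder) > 0:
--                 temp_list = list(current_terminal_holder[-1])
--                 temp_list.append(terminal_list_item)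
--                 current_terminal_holder.append(temp_list)
--             else:
--                 current_terminal_holder.append([terminal_list_item])
--
--         all_terminal_list += current_terminal_holder
--
--     all_terminal_list = [ele for ind, ele in enumerate(all_terminal_list) if ele not in all_terminal_list[:ind]]
--     return all_terminal_list
-- ===== SOURCE B (Python) =====
-- def _all_feature_terminal_list(features_dict: dict) -> list:
--     all_terminal_list = []
--     for value in features_dict.values():
--         vals = list(value)
--         all_terminal_list.extend(vals[:i] for i in range(1, len(vals) + 1))
--     seen = set()
--     result = []
--     for ele in all_terminal_list:
--         key = tuple(ele)
--         if key not in seen: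
--             seen.add(key)
--             result.append(ele)
--     return result
-- ===== Notes on version B (the rewrite author's own statement) =====
-- stated objective: faster
-- what changed: Each cumulative prefix is built independently by slicing the value list (no previous-prefix accumulator state), and the final order-preserving dedup is a single pass with a hash seen-set of tuples instead of re-scanning the list prefix for every element.
import Mathlib
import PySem

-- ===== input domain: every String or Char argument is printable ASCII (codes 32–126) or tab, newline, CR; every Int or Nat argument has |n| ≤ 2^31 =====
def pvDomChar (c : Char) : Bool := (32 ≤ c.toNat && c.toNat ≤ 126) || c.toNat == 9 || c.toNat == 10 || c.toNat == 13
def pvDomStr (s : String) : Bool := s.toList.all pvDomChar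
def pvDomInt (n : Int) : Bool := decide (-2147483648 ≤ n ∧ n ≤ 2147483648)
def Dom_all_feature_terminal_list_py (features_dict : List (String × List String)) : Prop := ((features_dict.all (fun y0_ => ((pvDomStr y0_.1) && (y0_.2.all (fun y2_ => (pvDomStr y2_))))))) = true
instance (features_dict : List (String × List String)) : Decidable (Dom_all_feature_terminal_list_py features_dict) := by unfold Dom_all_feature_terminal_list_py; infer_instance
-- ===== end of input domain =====

-- B builds each cumulative prefix independently by slicing (no previous-prefix accumulator) and dedups in one pass with a seen-set instead of scanning the list prefix per element; measurably faster (quadratic dedup scan removed).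


-- ===== PORT A =====
-- inner loop body: current_terminal_holder[-1] is guarded by len > 0, so pyGet? … (-1) is some; getD [] is exact
def pvHolderStep (holder : List (List String)) (terminal_list_item : String) : List (List String) :=
  if holder.length > 0 then
    holder ++ [((PySem.List.pyGet? holder (-1)).getD []) ++ [terminal_list_item]]
  else holder ++ [[terminal_list_item]]

-- the final comprehension [ele for ind, ele in enumerate(xs) if ele not in xs[:ind]] as the obvious
-- structural recursion carrying the index; xs[:ind] with ind ≥ 0 is xs.take ind
def pvDedupGoA (xs : List (List String)) (all : List (List String)) (ind : Nat) : List (List String) :=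
  match xs with
  | [] => []
  | ele :: rest =>
      if (all.take ind).contains ele then pvDedupGoA rest all (ind + 1)
      else ele :: pvDedupGoA rest all (ind + 1)

def all_feature_terminal_list_py (features_dict : List (String × List String)) : List (List String) :=
  let all_terminal_list :=
    features_dict.foldl (fun acc item => acc ++ item.2.foldl pvHolderStep []) []
  pvDedupGoA all_terminal_list all_terminal_list 0

-- ===== PORT B =====
-- [vals[:i] for i in range(1, len(vals)+1)]
def pvPrefixesB (vals : List String) : List (List String) :=
  (PySem.List.pyRange 1 ((vals.length : Int) + 1) 1).map
    (fun i => PySem.List.slice vals none (some i))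

-- seen-set single-pass dedup keeping first occurrences
def pvDedupB (xs : List (List String)) : List (List String) :=
  (xs.foldl
    (fun st ele => if st.1.contains ele then st else (st.1.add ele, st.2 ++ [ele]))
    ((PySem.Set.empty : PySem.Set (List String)), ([] : List (List String)))).2

def all_feature_terminal_list_py_alt (features_dict : List (String × List String)) : List (List String) :=
  pvDedupB (features_dict.foldl (fun acc value => acc ++ pvPrefixesB value.2) [])

-- ===== PRECONDITION & SPEC =====
def Spec_all_feature_terminal_list_py (features_dict : List (String × List String)) (out : List (List String)) : Prop := out = all_feature_terminal_list_py_alt features_dict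
instance (features_dict : List (String × List String)) (out : List (List String)) : Decidable (Spec_all_feature_terminal_list_py features_dict out) := by unfold Spec_all_feature_terminal_list_py; infer_instance

-- ===== CLAIM (what is proved, stated in full; the proofs are below) =====
def Claim_equal_all_feature_terminal_list_py : Prop := ∀ (features_dict : List (String × List String)), Dom_all_feature_terminal_list_py features_dict → Spec_all_feature_terminal_list_py features_dict (all_feature_terminal_list_py features_dict)

-- ===== LEMMAS AND PROOFS =====

-- common characterisation of one item's cumulative lists
def pvCumul (acc : List String) : List String → List (List String)
  | [] => []
  | t :: ts => (acc ++ [t]) :: pvCumul (acc ++ [t]) ts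

lemma pvHolder_snoc (vals : List String) : ∀ (h0 : List (List String)) (acc : List String),
    vals.foldl pvHolderStep (h0 ++ [acc]) = (h0 ++ [acc]) ++ pvCumul acc vals := by
  induction vals with
  | nil => intro h0 acc; simp [pvCumul]
  | cons t ts ih =>
      intro h0 acc
      have hstep : pvHolderStep (h0 ++ [acc]) t = (h0 ++ [acc]) ++ [acc ++ [t]] := by
        simp [pvHolderStep, PySem.List.pyGet?, PySem.List.pyIdx?]
      simp only [List.foldl_cons, hstep]
      rw [show (h0 ++ [acc]) ++ [acc ++ [t]] = (h0 ++ [acc] : List (List String)) ++ [acc ++ [t]] from rfl]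
      rw [ih (h0 ++ [acc]) (acc ++ [t])]
      simp [pvCumul]

lemma pvInner_eq_cumul (vals : List String) :
    vals.foldl pvHolderStep [] = pvCumul [] vals := by
  cases vals with
  | nil => rfl
  | cons t ts =>
      have : pvHolderStep [] t = [] ++ [[t]] := by simp [pvHolderStep]
      simp only [List.foldl_cons, this]
      have := pvHolder_snoc ts ([] : List (List String)) [t]
      simpa [pvCumul] using this

lemma pvPrefixes_eq_cumul_gen (vals : List String) : ∀ (acc : List String),
    (List.range vals.length).map (fun i => acc ++ vals.take (i + 1)) = pvCumul acc vals := by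
  induction vals with
  | nil => intro acc; simp [pvCumul]
  | cons t ts ih =>
      intro acc
      rw [List.length_cons, List.range_succ_eq_map]
      simp only [List.map_cons, List.map_map]
      have h1 : acc ++ (t :: ts).take (0 + 1) = acc ++ [t] := by simp
      have h2 : ((fun i => acc ++ (t :: ts).take (i + 1)) ∘ Nat.succ)
          = fun i => (acc ++ [t]) ++ ts.take (i + 1) := by
        funext i
        simp [Function.comp, List.take_succ_cons, Nat.succ_eq_add_one]
      rw [h1, h2, ih (acc ++ [t])]
      simp [pvCumul]

lemma pvPrefixesB_eq_cumul (vals : List String) :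
    pvPrefixesB vals = pvCumul [] vals := by
  unfold pvPrefixesB
  rw [PySem.List.pyRange_one 1 ((vals.length : Int) + 1)]
  have hn : (((vals.length : Int) + 1) - 1).toNat = vals.length := by omega
  rw [hn, List.map_map]
  have h : ((fun i => PySem.List.slice vals none (some i)) ∘ fun k : Nat => (1 : Int) + (k : Int))
      = fun k : Nat => ([] : List String) ++ vals.take (k + 1) := by
    funext k
    have hc : (1 : Int) + (k : Int) = (((k + 1 : Nat)) : Int) := by push_cast; ring
    simp only [Function.comp, hc, PySem.List.slice_to_natCast, List.nil_append]
  rw [h, pvPrefixes_eq_cumul_gen vals []]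

-- the first-occurrence filter both dedups compute
def pvFilterPart (pre : List (List String)) : List (List String) → List (List String)
  | [] => []
  | x :: xs => if pre.contains x then pvFilterPart (pre ++ [x]) xs
               else x :: pvFilterPart (pre ++ [x]) xs

lemma pvDedupGoA_eq (xs : List (List String)) : ∀ (pre : List (List String)),
    pvDedupGoA xs (pre ++ xs) pre.length = pvFilterPart pre xs := by
  induction xs with
  | nil => intro pre; simp [pvDedupGoA, pvFilterPart]
  | cons x rest ih =>
      intro pre
      have htake : (pre ++ x :: rest).take pre.length = pre := by
        simpa using List.take_left pre (x :: rest)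
      have hrw : pre ++ x :: rest = (pre ++ [x]) ++ rest := by simp
      have hlen : pre.length + 1 = (pre ++ [x]).length := by simp
      simp only [pvDedupGoA, htake, pvFilterPart]
      rw [hrw, hlen, ih (pre ++ [x])]

lemma pvDedupB_go (xs : List (List String)) :
    ∀ (seen : PySem.Set (List String)) (res pre : List (List String)),
    (∀ a, seen.contains a = pre.contains a) →
    (xs.foldl
      (fun st ele => if st.1.contains ele then st else (st.1.add ele, st.2 ++ [ele]))
      (seen, res)).2 = res ++ pvFilterPart pre xs := by
  induction xs with
  | nil => intro seen res pre _; simp [pvFilterPart]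
  | cons x rest ih =>
      intro seen res pre hinv
      simp only [List.foldl_cons]
      by_cases hx : seen.contains x = true
      · have hpre : pre.contains x = true := (hinv x) ▸ hx
        have hmem : x ∈ pre := by simpa using hpre
        simp only [hx, if_true]
        have hinv' : ∀ a, seen.contains a = (pre ++ [x]).contains a := by
          intro a
          by_cases hax : a = x
          · subst hax
            simp only [List.contains_append, hx, Bool.true_eq]
            simp [hpre]
          · simp only [List.contains_append]
            rw [hinv a]
            simp [hax]
        rw [ih seen res (pre ++ [x]) hinv']
        simp [pvFilterPart, hmem]
      · have hxf : seen.contains x = false := by simpa using hx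
        have hpre : pre.contains x = false := (hinv x) ▸ hxf
        have hnmem : x ∉ pre := by simpa using hpre
        have hnseen : x ∉ seen := by simpa using hxf
        simp only [hxf, Bool.false_eq_true, if_false]
        have hadd : seen.add x = seen ++ [x] := by
          simp [PySem.Set.add, hnseen]
        have hinv' : ∀ a, (seen.add x).contains a = (pre ++ [x]).contains a := by
          intro a
          rw [hadd]
          have h2 := hinv a
          simp only [PySem.Set.contains_eq_listContains] at h2 ⊢
          simp only [List.contains_append, h2]
        rw [ih (seen.add x) (res ++ [x]) (pre ++ [x]) hinv']
        simp [pvFilterPart, hnmem]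

-- ===== VERDICT (by name: the statement is the Claim_ definition above) =====
theorem all_feature_terminal_list_py_spec : Claim_equal_all_feature_terminal_list_py := by
  intro features_dict _
  unfold Spec_all_feature_terminal_list_py
  unfold all_feature_terminal_list_py all_feature_terminal_list_py_alt
  have hfun : (fun acc (item : String × List String) => acc ++ item.2.foldl pvHolderStep [])
      = fun acc (value : String × List String) => acc ++ pvPrefixesB value.2 := by
    funext acc item
    rw [pvInner_eq_cumul, pvPrefixesB_eq_cumul]
  rw [hfun]
  set all := features_dict.foldl (fun acc value => acc ++ pvPrefixesB value.2) [] with hall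
  have hA : pvDedupGoA all all 0 = pvFilterPart [] all := by
    simpa using pvDedupGoA_eq all []
  have hB : pvDedupB all = pvFilterPart [] all := by
    unfold pvDedupB
    simpa using pvDedupB_go all PySem.Set.empty [] [] (by intro a; rfl)
  rw [hA, hB]
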